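-- pv_equiv track=rewrite | github.com/KiUngSong/TerraFin | src/TerraFin/data/providers/corporate/cusip_resolver.py | _select_ticker
-- ===== SOURCE A (Python) =====
-- from typing import Any
--
-- _PREFERRED_EXCHANGE_CODES = ("US", "UV", "UN", "UQ", "UA", "UR")
--
-- def _select_ticker(entries: list[dict[str, Any]]) -> str | None:
--     """Pick the best ticker from an OpenFIGI `data` array.
--
--     Prefers entries with a US composite exchange code; falls back to the first
--     entry that has a non-empty ticker.
--     """
--     for code in _PREFERRED_EXCHANGE_CODES:
--         for entry in entries:
--             if str(entry.get("exchCode", "")).upper() == code: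
--                 ticker = str(entry.get("ticker", "")).strip()
--                 if ticker:
--                     return ticker.upper()
--     for entry in entries:
--         ticker = str(entry.get("ticker", "")).strip()
--         if ticker:
--             return ticker.upper()
--     return None
-- ===== SOURCE B (Python) =====
-- from typing import Any
--
-- _PREFERRED_EXCHANGE_CODES = ("US", "UV", "UN", "UQ", "UA", "UR")
--
-- def _select_ticker(entries: list[dict[str, Any]]) -> str | None:
--     """Pick the best ticker from an OpenFIGI `data` array.
--
--     Single pass: rank each entry by exchange-code preference (0-5, 6 for
--     non-preferred) and keep the first entry with the minimum rank.
--     """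
--     rank = {code: i for i, code in enumerate(_PREFERRED_EXCHANGE_CODES)}
--     best = None  # (rank, uppercased ticker) of the best candidate so far
--     for entry in entries:
--         ticker = str(entry.get("ticker", "")).strip()
--         if not ticker:
--             continue
--         r = rank.get(str(entry.get("exchCode", "")).upper(), len(_PREFERRED_EXCHANGE_CODES))
--         if best is None or r < best[0]:
--             best = (r, ticker.upper())
--     return None if best is None else best[1]
-- ===== Notes on version B (the rewrite author's own statement) =====
-- stated objective: alternative
-- what changed: Replaces the six full rescans of the entry list (one per preferred exchange code) plus a fallback scan with a single pass that ranks each entry via a precomputed code->priority dict and keeps the first entry of minimum rank.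
import Mathlib
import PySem

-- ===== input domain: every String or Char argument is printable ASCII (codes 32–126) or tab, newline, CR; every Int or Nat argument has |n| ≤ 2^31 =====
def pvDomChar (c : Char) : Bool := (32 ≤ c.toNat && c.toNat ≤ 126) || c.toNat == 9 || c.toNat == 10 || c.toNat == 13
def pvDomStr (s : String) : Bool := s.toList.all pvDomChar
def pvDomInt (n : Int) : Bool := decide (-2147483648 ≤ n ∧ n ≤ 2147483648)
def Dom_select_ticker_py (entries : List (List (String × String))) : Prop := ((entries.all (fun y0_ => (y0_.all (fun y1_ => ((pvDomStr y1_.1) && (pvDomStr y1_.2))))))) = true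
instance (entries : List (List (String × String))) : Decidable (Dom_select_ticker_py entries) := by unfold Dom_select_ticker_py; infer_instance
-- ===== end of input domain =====

-- B replaces A's six per-code rescans plus fallback scan by a single pass that
-- keeps the first entry of minimum exchange-code rank (a different algorithm).

-- entry.get(k, dflt): first-match lookup in the association list (shared by both ports)
def getDflt (entry : List (String × String)) (k dflt : String) : String :=
  match entry.find? (fun p => p.1 = k) with
  | some p => p.2
  | none => dflt

def preferredCodes : List String := ["US", "UV", "UN", "UQ", "UA", "UR"]

-- ===== PORT A =====
def select_ticker_py (entries : List (List (String × String))) : Option String :=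
  (preferredCodes.findSome? (fun code =>
    entries.findSome? (fun entry =>
      if PySem.Str.upper (getDflt entry "exchCode" "") = code then
        let ticker := PySem.Str.strip (getDflt entry "ticker" "")
        if ticker ≠ "" then some (PySem.Str.upper ticker) else none
      else none))).orElse (fun _ =>
    entries.findSome? (fun entry =>
      let ticker := PySem.Str.strip (getDflt entry "ticker" "")
      if ticker ≠ "" then some (PySem.Str.upper ticker) else none))

-- ===== PORT B =====
-- rank = {code: i for i, code in enumerate(_PREFERRED_EXCHANGE_CODES)}
def rankDict : PySem.Dict String Int :=
  PySem.Dict.ofList ((PySem.List.enumerate preferredCodes).map (fun p => (p.2, p.1)))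

def select_ticker_py_alt (entries : List (List (String × String))) : Option String :=
  let best := entries.foldl (fun best entry =>
    let ticker := PySem.Str.strip (getDflt entry "ticker" "")
    if ticker = "" then best
    else
      let r := rankDict.getD (PySem.Str.upper (getDflt entry "exchCode" "")) (preferredCodes.length : Int)
      match best with
      | none => some (r, PySem.Str.upper ticker)
      | some b => if r < b.1 then some (r, PySem.Str.upper ticker) else some b) none
  best.map (fun b => b.2)

-- ===== PRECONDITION & SPEC =====
def Spec_select_ticker_py (entries : List (List (String × String))) (out : Option String) : Prop := out = select_ticker_py_alt entries
instance (entries : List (List (String × String))) (out : Option String) : Decidable (Spec_select_ticker_py entries out) := by unfold Spec_select_ticker_py; infer_instance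

-- ===== CLAIM (what is proved, stated in full; the proofs are below) =====
def Claim_equal_select_ticker_py : Prop := ∀ (entries : List (List (String × String))), Dom_select_ticker_py entries → Spec_select_ticker_py entries (select_ticker_py entries)

-- ===== LEMMAS AND PROOFS =====

-- stripped ticker and exchange-code rank of one entry
def tkr (e : List (String × String)) : String := PySem.Str.strip (getDflt e "ticker" "")
def rnk (e : List (String × String)) : Int :=
  rankDict.getD (PySem.Str.upper (getDflt e "exchCode" "")) 6

-- the qualifying entries, as (rank, uppercased ticker) pairs
def qual (entries : List (List (String × String))) : List (Int × String) :=
  entries.filterMap (fun e => if tkr e = "" then none else some (rnk e, PySem.Str.upper (tkr e)))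

-- first element of minimum rank (ties: the earliest)
def pickMin : List (Int × String) → Option (Int × String)
  | [] => none
  | p :: l => match pickMin l with
    | none => some p
    | some q => if q.1 < p.1 then some q else some p

def findRank (r : Int) (q : List (Int × String)) : Option (Int × String) :=
  q.find? (fun p => p.1 = r)

-- A's scan order, expressed over the qualifying pairs
def chain (q : List (Int × String)) : Option (Int × String) :=
  (findRank 0 q).orElse (fun _ => (findRank 1 q).orElse (fun _ =>
    (findRank 2 q).orElse (fun _ => (findRank 3 q).orElse (fun _ =>
    (findRank 4 q).orElse (fun _ => (findRank 5 q).orElse (fun _ => q.head?))))))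

def comb (s o : Option (Int × String)) : Option (Int × String) :=
  match s, o with
  | none, o => o
  | some p, none => some p
  | some p, some q => if q.1 < p.1 then some q else some p

theorem rankDict_getD (u : String) :
    rankDict.getD u 6 = if u = "US" then 0 else if u = "UV" then 1 else if u = "UN" then 2
      else if u = "UQ" then 3 else if u = "UA" then 4 else if u = "UR" then 5 else 6 := by
  have : rankDict = ((((((PySem.Dict.empty.insert "US" 0).insert "UV" 1).insert "UN" 2).insert "UQ" 3).insert "UA" 4).insert "UR" (5:Int)) := by decide
  rw [this]
  simp [PySem.Dict.getD_insert, PySem.Dict.getD_empty]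
  split_ifs <;> simp_all

theorem rnk_le (e : List (String × String)) : 0 ≤ rnk e ∧ rnk e ≤ 6 := by
  unfold rnk; rw [rankDict_getD]; split_ifs <;> omega

theorem rnk_eq_iff (e : List (String × String)) (r : Int) (hr : 0 ≤ r ∧ r < 6) :
    (rnk e = r) ↔ (PySem.Str.upper (getDflt e "exchCode" "") = preferredCodes.getD r.toNat "") := by
  obtain ⟨h0, h6⟩ := hr
  unfold rnk
  rw [rankDict_getD]
  interval_cases r <;> simp [preferredCodes] <;> split_ifs <;> simp_all

theorem inner_eq (r : Int) (hr : 0 ≤ r ∧ r < 6) (entries : List (List (String × String))) :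
    entries.findSome? (fun entry =>
      if PySem.Str.upper (getDflt entry "exchCode" "") = preferredCodes.getD r.toNat "" then
        let ticker := PySem.Str.strip (getDflt entry "ticker" "")
        if ticker ≠ "" then some (PySem.Str.upper ticker) else none
      else none) = (findRank r (qual entries)).map Prod.snd := by
  induction entries with
  | nil => rfl
  | cons e l ih =>
    rw [List.findSome?_cons]
    by_cases hc : PySem.Str.upper (getDflt e "exchCode" "") = preferredCodes.getD r.toNat ""
    · by_cases ht : tkr e = ""
      · have hfe : (if PySem.Str.upper (getDflt e "exchCode" "") = preferredCodes.getD r.toNat "" then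
            let ticker := PySem.Str.strip (getDflt e "ticker" "")
            if ticker ≠ "" then some (PySem.Str.upper ticker) else none
          else none) = none := by
          rw [if_pos hc]; simp only [tkr] at ht; simp [ht]
        rw [hfe]
        have hq : qual (e :: l) = qual l := by simp [qual, ht]
        rw [hq] at *; exact ih
      · have hfe : (if PySem.Str.upper (getDflt e "exchCode" "") = preferredCodes.getD r.toNat "" then
            let ticker := PySem.Str.strip (getDflt e "ticker" "")
            if ticker ≠ "" then some (PySem.Str.upper ticker) else none
          else none) = some (PySem.Str.upper (tkr e)) := by
          rw [if_pos hc]; simp only [tkr] at ht ⊢; simp [ht]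
        rw [hfe]
        have hq : qual (e :: l) = (rnk e, PySem.Str.upper (tkr e)) :: qual l := by simp [qual, ht]
        have hre : rnk e = r := (rnk_eq_iff e r hr).2 hc
        rw [hq]
        simp [findRank, List.find?_cons, hre]
    · have hfe : (if PySem.Str.upper (getDflt e "exchCode" "") = preferredCodes.getD r.toNat "" then
          let ticker := PySem.Str.strip (getDflt e "ticker" "")
          if ticker ≠ "" then some (PySem.Str.upper ticker) else none
        else none) = none := by rw [if_neg hc]
      rw [hfe]
      by_cases ht : tkr e = ""
      · have hq : qual (e :: l) = qual l := by simp [qual, ht]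
        rw [hq]; exact ih
      · have hq : qual (e :: l) = (rnk e, PySem.Str.upper (tkr e)) :: qual l := by simp [qual, ht]
        have hre : ¬ rnk e = r := fun h => hc ((rnk_eq_iff e r hr).1 h)
        rw [hq]
        have : findRank r ((rnk e, PySem.Str.upper (tkr e)) :: qual l) = findRank r (qual l) := by
          simp [findRank, List.find?_cons, hre]
        rw [this]; exact ih

theorem fallback_eq (entries : List (List (String × String))) :
    entries.findSome? (fun entry =>
      let ticker := PySem.Str.strip (getDflt entry "ticker" "")
      if ticker ≠ "" then some (PySem.Str.upper ticker) else none)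
    = (qual entries).head?.map Prod.snd := by
  induction entries with
  | nil => rfl
  | cons e l ih =>
    rw [List.findSome?_cons]
    by_cases ht : tkr e = ""
    · simp [qual, ht, tkr] at *
      simp [ht, ih]
    · simp [qual, ht, tkr] at *
      simp [ht]

set_option maxHeartbeats 1000000 in
theorem A_eq_chain (entries : List (List (String × String))) :
    select_ticker_py entries = (chain (qual entries)).map Prod.snd := by
  have i0 := inner_eq 0 (by norm_num) entries
  have i1 := inner_eq 1 (by norm_num) entries
  have i2 := inner_eq 2 (by norm_num) entries
  have i3 := inner_eq 3 (by norm_num) entries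
  have i4 := inner_eq 4 (by norm_num) entries
  have i5 := inner_eq 5 (by norm_num) entries
  rw [show preferredCodes.getD (0:Int).toNat "" = "US" from rfl] at i0
  rw [show preferredCodes.getD (1:Int).toNat "" = "UV" from rfl] at i1
  rw [show preferredCodes.getD (2:Int).toNat "" = "UN" from rfl] at i2
  rw [show preferredCodes.getD (3:Int).toNat "" = "UQ" from rfl] at i3
  rw [show preferredCodes.getD (4:Int).toNat "" = "UA" from rfl] at i4
  rw [show preferredCodes.getD (5:Int).toNat "" = "UR" from rfl] at i5
  unfold select_ticker_py
  simp only [preferredCodes, List.findSome?_cons, List.findSome?_nil]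
  rw [i0, i1, i2, i3, i4, i5, fallback_eq]
  unfold chain
  cases findRank 0 (qual entries) <;> cases findRank 1 (qual entries) <;>
    cases findRank 2 (qual entries) <;> cases findRank 3 (qual entries) <;>
    cases findRank 4 (qual entries) <;> cases findRank 5 (qual entries) <;>
    cases (qual entries).head? <;> rfl

theorem foldB (l : List (List (String × String))) (s : Option (Int × String)) :
    l.foldl (fun best entry =>
      let ticker := PySem.Str.strip (getDflt entry "ticker" "")
      if ticker = "" then best
      else
        let r := rankDict.getD (PySem.Str.upper (getDflt entry "exchCode" "")) (preferredCodes.length : Int)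
        match best with
        | none => some (r, PySem.Str.upper ticker)
        | some b => if r < b.1 then some (r, PySem.Str.upper ticker) else some b) s
    = comb s (pickMin (qual l)) := by
  induction l generalizing s with
  | nil => cases s <;> rfl
  | cons e l ih =>
    rw [List.foldl_cons, ih]
    by_cases ht : tkr e = ""
    · have hq : qual (e :: l) = qual l := by simp [qual, ht]
      simp only [tkr] at ht
      simp [ht, hq]
    · have hq : qual (e :: l) = (rnk e, PySem.Str.upper (tkr e)) :: qual l := by simp [qual, ht]
      rw [hq]
      have ht' : ¬ PySem.Str.strip (getDflt e "ticker" "") = "" := ht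
      cases s with
      | none =>
        cases hpm : pickMin (qual l) with
        | none =>
        · simp only [show ((preferredCodes.length : Int)) = 6 from rfl, if_neg ht', rnk, tkr,
            pickMin, hpm, comb]
          try split_ifs <;> first | rfl | (exfalso; omega) |
            (simp only []; split_ifs <;> first | rfl | (exfalso; omega))
        | some q =>
        · simp only [show ((preferredCodes.length : Int)) = 6 from rfl, if_neg ht', rnk, tkr,
            pickMin, hpm, comb]
          try split_ifs <;> first | rfl | (exfalso; omega) |
            (simp only []; split_ifs <;> first | rfl | (exfalso; omega))
      | some p =>
        cases hpm : pickMin (qual l) with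
        | none =>
        · simp only [show ((preferredCodes.length : Int)) = 6 from rfl, if_neg ht', rnk, tkr,
            pickMin, hpm, comb]
          try split_ifs <;> first | rfl | (exfalso; omega) |
            (simp only []; split_ifs <;> first | rfl | (exfalso; omega))
        | some q =>
        · simp only [show ((preferredCodes.length : Int)) = 6 from rfl, if_neg ht', rnk, tkr,
            pickMin, hpm, comb]
          try split_ifs <;> first | rfl | (exfalso; omega) |
            (simp only []; split_ifs <;> first | rfl | (exfalso; omega))

theorem B_eq_pickMin (entries : List (List (String × String))) :
    select_ticker_py_alt entries = (pickMin (qual entries)).map Prod.snd := by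
  unfold select_ticker_py_alt
  rw [foldB]
  cases pickMin (qual entries) <;> rfl

theorem pickMin_cons_ne_none {a : Int × String} {t : List (Int × String)} :
    pickMin (a :: t) ≠ none := by
  simp only [pickMin]
  cases pickMin t with
  | none => simp
  | some q0 => dsimp only; split <;> simp

theorem pickMin_none_iff {q : List (Int × String)} : pickMin q = none ↔ q = [] := by
  cases q with
  | nil => simp [pickMin]
  | cons a t =>
    constructor
    · intro h; exact absurd h pickMin_cons_ne_none
    · intro h; simp at h

theorem pickMin_min {q : List (Int × String)} {m : Int × String} (h : pickMin q = some m) :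
    ∀ p ∈ q, m.1 ≤ p.1 := by
  induction q generalizing m with
  | nil => simp [pickMin] at h
  | cons a t ih =>
    intro p hp
    simp only [pickMin] at h
    cases hpm : pickMin t with
    | none =>
      rw [hpm] at h; dsimp only at h
      have ht : t = [] := pickMin_none_iff.1 hpm
      subst ht
      injection h with h'
      simp at hp
      simp [← h', hp]
    | some q0 =>
      rw [hpm] at h; dsimp only at h
      have hq0 := ih hpm
      rcases List.mem_cons.1 hp with rfl | hp'
      · split at h <;> injection h with h'
        · rw [← h']; omega
        · rw [← h']
      · split at h <;> injection h with h'
        · rw [← h']; exact hq0 p hp'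
        · rw [← h']
          have := hq0 p hp'
          omega

theorem pickMin_findRank {q : List (Int × String)} {m : Int × String} (h : pickMin q = some m) :
    findRank m.1 q = some m := by
  induction q generalizing m with
  | nil => simp [pickMin] at h
  | cons a t ih =>
    simp only [pickMin] at h
    cases hpm : pickMin t with
    | none =>
      rw [hpm] at h; dsimp only at h
      injection h with h'; subst h'
      simp [findRank]
    | some q0 =>
      rw [hpm] at h; dsimp only at h
      split at h <;> injection h with h'
      · have hle := pickMin_min hpm
        have hlt : m.1 < a.1 := by rw [← h'] at *; assumption
        unfold findRank
        rw [List.find?_cons_of_neg (by simp; omega)]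
        rw [← h']; exact ih hpm
      · subst h'
        simp [findRank]

theorem pickMin_head {h : Int × String} {t : List (Int × String)} {m : Int × String}
    (hp : pickMin (h :: t) = some m) : m = h ∨ m.1 < h.1 := by
  simp only [pickMin] at hp
  cases hpm : pickMin t with
  | none => rw [hpm] at hp; dsimp only at hp; injection hp with h'; left; exact h'.symm
  | some q0 =>
    rw [hpm] at hp; dsimp only at hp
    split at hp <;> injection hp with h'
    · right; rw [← h']; assumption
    · left; exact h'.symm

theorem chain_eq_pickMin (q : List (Int × String)) (H : ∀ p ∈ q, 0 ≤ p.1 ∧ p.1 ≤ 6) :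
    chain q = pickMin q := by
  cases hpm : pickMin q with
  | none =>
    have : q = [] := pickMin_none_iff.1 hpm
    subst this; rfl
  | some m =>
    have hfr := pickMin_findRank hpm
    have hmem : m ∈ q := List.mem_of_find?_eq_some hfr
    have hm6 := (H m hmem).2
    have hm0 := (H m hmem).1
    have hnone : ∀ i : Int, i < m.1 → findRank i q = none := by
      intro i hi
      apply List.find?_eq_none.2
      intro p hp
      have := pickMin_min hpm p hp
      simp
      omega
    unfold chain
    by_cases h0 : m.1 = 0
    · rw [h0] at hfr; rw [hfr]; rfl
    · rw [hnone 0 (by omega)]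
      by_cases h1 : m.1 = 1
      · rw [h1] at hfr; rw [hfr]; rfl
      · rw [hnone 1 (by omega)]
        by_cases h2 : m.1 = 2
        · rw [h2] at hfr; rw [hfr]; rfl
        · rw [hnone 2 (by omega)]
          by_cases h3 : m.1 = 3
          · rw [h3] at hfr; rw [hfr]; rfl
          · rw [hnone 3 (by omega)]
            by_cases h4 : m.1 = 4
            · rw [h4] at hfr; rw [hfr]; rfl
            · rw [hnone 4 (by omega)]
              by_cases h5 : m.1 = 5
              · rw [h5] at hfr; rw [hfr]; rfl
              · rw [hnone 5 (by omega)]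
                have h6 : m.1 = 6 := by omega
                cases q with
                | nil => simp at hmem
                | cons a t =>
                  rcases pickMin_head hpm with rfl | hlt
                  · rfl
                  · have := (H a (by simp)).2
                    omega

-- ===== VERDICT (by name: the statement is the Claim_ definition above) =====
theorem select_ticker_py_spec : Claim_equal_select_ticker_py := by
  intro entries _
  unfold Spec_select_ticker_py
  rw [A_eq_chain, B_eq_pickMin, chain_eq_pickMin]
  intro p hp
  simp only [qual, List.mem_filterMap] at hp
  obtain ⟨e, _, he⟩ := hp
  by_cases h : tkr e = "" <;> simp [h] at he
  · rw [← he]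
    exact rnk_le e
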